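-- pv_equiv track=rewrite | github.com/ValerieMauduit/AoC2024 | all_days/day14.py | existing_line
-- ===== SOURCE A (Python) =====
-- from itertools import groupby
-- from operator import itemgetter
--
-- def existing_line(points, min_length, height=103):
--     found = False
--     line = 0
--     position = [0, 0]
--     while (not found) & (line < height):
--         points_in_line = list(set([p[0] for p in points if p[1] == line]))
--         points_in_line.sort()
--         lines = [list(map(itemgetter(1), g)) for k, g in groupby(enumerate(points_in_line), lambda x: x[0] - x[1])]
--         if lines:
--             if max([len(line) for line in lines]) >= min_length:
--                 found = True
--                 position = [[line[0] for line in lines if len(line) >= min_length][0], line]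
--         line += 1
--     return found, position
-- ===== SOURCE B (Python) =====
-- def existing_line(points, min_length, height=103):
--     # One pass bucketing points by row, then scan only populated rows in increasing order,
--     # finding the first row whose sorted distinct x's contain a consecutive run of >= min_length.
--     rows = {}
--     for p in points:
--         y = p[1]
--         if 0 <= y < height:
--             rows.setdefault(y, set()).add(p[0])
--     for y in sorted(rows):
--         xs = sorted(rows[y])
--         start = prev = xs[0]
--         for x in xs[1:]:
--             if x != prev + 1:
--                 if prev - start + 1 >= min_length:
--                     break
--                 start = x
--             prev = x
--         if prev - start + 1 >= min_length:
--             return True, [start, y]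
--     return False, [0, 0]
-- ===== Notes on version B (the rewrite author's own statement) =====
-- stated objective: faster
-- what changed: A rescans the whole point list once per row (height times) and groups runs via enumerate+groupby; B buckets points by row into a dict in one pass, then scans only the populated rows in sorted order, detecting the first qualifying consecutive run with a single linear scan and early exit.
-- outside the precondition, e.g. on existing_line([[], [0]], -1, -1): A returns (False, [0, 0]), B raises IndexError
import Mathlib
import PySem

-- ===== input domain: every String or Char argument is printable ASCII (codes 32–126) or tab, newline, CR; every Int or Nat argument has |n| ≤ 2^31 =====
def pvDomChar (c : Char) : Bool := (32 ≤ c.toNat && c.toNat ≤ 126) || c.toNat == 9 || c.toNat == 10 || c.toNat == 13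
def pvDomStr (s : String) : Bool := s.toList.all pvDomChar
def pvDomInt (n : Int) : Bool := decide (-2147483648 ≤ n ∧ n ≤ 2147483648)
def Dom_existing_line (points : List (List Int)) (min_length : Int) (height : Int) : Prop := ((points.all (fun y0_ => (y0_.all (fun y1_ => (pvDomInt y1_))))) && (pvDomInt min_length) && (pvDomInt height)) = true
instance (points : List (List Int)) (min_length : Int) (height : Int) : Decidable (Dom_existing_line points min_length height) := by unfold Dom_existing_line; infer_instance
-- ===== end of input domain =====

-- B buckets the points by row in one pass and scans only populated rows in sorted order
-- (A rescans all points for every row of the grid); equivalence of the RETURN values is proved.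

-- ===== PORT A =====
-- itertools.groupby with key x[0]-x[1]: maximal blocks of adjacent pairs with equal key
def pvGroupby : List (Int × Int) → List (List (Int × Int))
  | [] => []
  | x :: xs =>
    match pvGroupby xs with
    | (y :: g) :: gs =>
      if x.1 - x.2 == y.1 - y.2 then (x :: y :: g) :: gs else [x] :: (y :: g) :: gs
    | _ => [[x]]

-- the body of A's while loop for row `line`: some x when a qualifying run is found
def pvARow (points : List (List Int)) (min_length line : Int) : Option Int :=
  -- points_in_line = list(set([p[0] for p in points if p[1] == line])); points_in_line.sort()
  let pts := PySem.List.sorted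
    (PySem.Set.ofList ((points.filter (fun p => PySem.List.pyGetD p 1 0 == line)).map
      (fun p => PySem.List.pyGetD p 0 0))) (fun x => x) false
  -- lines = [list(map(itemgetter(1), g)) for k, g in groupby(enumerate(points_in_line), ...)]
  let lns := (pvGroupby (PySem.List.enumerate pts 0)).map (fun g => g.map (fun q => q.2))
  if lns ≠ [] then
    match PySem.List.max? (lns.map (fun l => (l.length : Int))) (fun x => x) with
    | some mx =>
      if min_length ≤ mx then
        some (PySem.List.pyGetD ((lns.filter (fun l => min_length ≤ (l.length : Int))).map
          (fun l => PySem.List.pyGetD l 0 0)) 0 0)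
      else none
    | none => none
  else none

-- while (not found) & (line < height)
def pvGoA (points : List (List Int)) (min_length height : Int)
    (found : Bool) (line : Int) (position : List Int) : Bool × List Int :=
  if h : found = false ∧ line < height then
    match pvARow points min_length line with
    | some x => pvGoA points min_length height true (line + 1) [x, line]
    | none => pvGoA points min_length height false (line + 1) position
  else (found, position)
termination_by (height - line).toNat
decreasing_by all_goals (obtain ⟨_, h2⟩ := h; omega)

def existing_line (points : List (List Int)) (min_length : Int) (height : Int) : Bool × List Int :=
  pvGoA points min_length height false 0 [0, 0]

-- ===== PORT B =====
-- rows = {}; for p in points: if 0 <= p[1] < height: rows.setdefault(p[1], set()).add(p[0])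
def pvBuckets (points : List (List Int)) (height : Int) : PySem.Dict Int (PySem.Set Int) :=
  points.foldl (fun d p =>
    let y := PySem.List.pyGetD p 1 0
    if 0 ≤ y ∧ y < height then
      d.modify y PySem.Set.empty (fun s => PySem.Set.add s (PySem.List.pyGetD p 0 0))
    else d) PySem.Dict.empty

-- inner scan over xs[1:], carrying (start, prev) of the current consecutive run
def pvScan (min_length : Int) : Int → Int → List Int → Int × Int
  | start, prev, [] => (start, prev)
  | start, prev, x :: rest =>
    if x ≠ prev + 1 then
      if min_length ≤ prev - start + 1 then (start, prev)
      else pvScan min_length x x rest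
    else pvScan min_length start x rest

-- for y in sorted(rows): ... (early return on the first qualifying row)
def pvRowsLoop (min_length : Int) (rows : PySem.Dict Int (PySem.Set Int)) : List Int → Bool × List Int
  | [] => (false, [0, 0])
  | y :: ys =>
    let xs := PySem.List.sorted (rows.getD y PySem.Set.empty) (fun x => x) false
    let x0 := PySem.List.pyGetD xs 0 0
    let sp := pvScan min_length x0 x0 (PySem.List.slice xs (some 1) none)
    if min_length ≤ sp.2 - sp.1 + 1 then (true, [sp.1, y]) else pvRowsLoop min_length rows ys

def existing_line_alt (points : List (List Int)) (min_length : Int) (height : Int) : Bool × List Int :=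
  let rows := pvBuckets points height
  pvRowsLoop min_length rows (PySem.List.sorted (PySem.Dict.keys rows) (fun x => x) false)

-- ===== PRECONDITION & SPEC =====
-- Pre_ excludes point lists containing a point with fewer than two coordinates: B (which buckets
-- every point) always raises IndexError there, and A raises too except when height <= 0 lets it
-- exit before touching the malformed point.
def Pre_existing_line (points : List (List Int)) (min_length : Int) (height : Int) : Prop :=
  ∀ p ∈ points, 2 ≤ p.length
instance (points : List (List Int)) (min_length : Int) (height : Int) :
    Decidable (Pre_existing_line points min_length height) := by
  unfold Pre_existing_line; infer_instance

def pvWitness_existing_line : List (List Int) × Int × Int := ([[1, 0], [2, 0], [3, 0], [7, 2]], 3, 5)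

def Spec_existing_line (points : List (List Int)) (min_length : Int) (height : Int) (out : Bool × List Int) : Prop := out = existing_line_alt points min_length height
instance (points : List (List Int)) (min_length : Int) (height : Int) (out : Bool × List Int) : Decidable (Spec_existing_line points min_length height out) := by unfold Spec_existing_line; infer_instance

-- ===== CLAIM (what is proved, stated in full; the proofs are below) =====
def Claim_equal_existing_line : Prop := ∀ (points : List (List Int)) (min_length : Int) (height : Int), Dom_existing_line points min_length height → Pre_existing_line points min_length height → Spec_existing_line points min_length height (existing_line points min_length height)

-- ===== LEMMAS AND PROOFS =====

-- maximal runs of consecutive integers, as (first, last) pairs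
def pvRunPairs : List Int → List (Int × Int)
  | [] => []
  | x :: xs =>
    match pvRunPairs xs with
    | (a, b) :: t => if a = x + 1 then (x, b) :: t else (x, x) :: (a, b) :: t
    | [] => [(x, x)]

def pvMerge (s p : Int) : List (Int × Int) → List (Int × Int)
  | [] => [(s, p)]
  | (a, b) :: t => if a = p + 1 then (s, b) :: t else (s, p) :: (a, b) :: t

-- the answer for one row list: start of the first maximal run of length ≥ m
def pvRowAns (m : Int) (xs : List Int) : Option Int :=
  ((pvRunPairs xs).find? (fun pr => decide (m ≤ pr.2 - pr.1 + 1))).map (fun pr => pr.1)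

-- the x-values of row y, in point order (with duplicates)
def pvRowOf (points : List (List Int)) (y : Int) : List Int :=
  (points.filter (fun p => PySem.List.pyGetD p 1 0 == y)).map (fun p => PySem.List.pyGetD p 0 0)

def pvAnsAt (points : List (List Int)) (m y : Int) : Option Int :=
  pvRowAns m (PySem.List.sorted (PySem.Set.ofList (pvRowOf points y)) (fun x => x) false)

-- reference result: first y in ys with a qualifying run
def pvResOf (points : List (List Int)) (m : Int) (ys : List Int) : Bool × List Int :=
  match ys.findSome? (fun y => (pvAnsAt points m y).map (fun x => (x, y))) with
  | some r => (true, [r.1, r.2])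
  | none => (false, [0, 0])

lemma pvRunPairs_cons (x : Int) (xs : List Int) :
    pvRunPairs (x :: xs) = pvMerge x x (pvRunPairs xs) := by
  cases h : pvRunPairs xs with
  | nil => simp [pvRunPairs, pvMerge, h]
  | cons pr t => cases pr; simp [pvRunPairs, pvMerge, h]

lemma pvRunPairs_head (x : Int) (r : List Int) :
    ∃ b t, pvRunPairs (x :: r) = (x, b) :: t := by
  rw [pvRunPairs_cons]
  cases h : pvRunPairs r with
  | nil => exact ⟨x, [], rfl⟩
  | cons pr t =>
    obtain ⟨a, b⟩ := pr
    by_cases hab : a = x + 1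
    · exact ⟨b, t, by simp [pvMerge, hab]⟩
    · exact ⟨x, (a, b) :: t, by simp [pvMerge, hab]⟩

lemma pvRunPairs_le : ∀ (xs : List Int), ∀ pr ∈ pvRunPairs xs, pr.1 ≤ pr.2 := by
  intro xs
  induction xs with
  | nil => simp [pvRunPairs]
  | cons x xs ih =>
    intro pr hpr
    rw [pvRunPairs_cons] at hpr
    cases h : pvRunPairs xs with
    | nil => rw [h] at hpr; simp [pvMerge] at hpr; simp [hpr]
    | cons q t =>
      obtain ⟨a, b⟩ := q
      rw [h] at hpr
      simp only [pvMerge] at hpr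
      split_ifs at hpr with hab
      · rcases List.mem_cons.mp hpr with h1 | h1
        · subst h1; have := ih (a, b) (by rw [h]; simp)
          simp at this ⊢; omega
        · exact ih pr (by rw [h]; exact List.mem_cons_of_mem _ h1)
      · rcases List.mem_cons.mp hpr with h1 | h1
        · subst h1; simp
        · exact ih pr (by rw [h]; exact h1)

lemma pvMerge_merge (s p : Int) (R : List (Int × Int)) :
    pvMerge s p (pvMerge (p + 1) (p + 1) R) = pvMerge s (p + 1) R := by
  cases R with
  | nil => simp [pvMerge]
  | cons pr t =>
    obtain ⟨a, b⟩ := pr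
    by_cases hab : a = p + 1 + 1
    · simp [pvMerge, hab]
    · simp [pvMerge, hab]

lemma pvScan_spec (m : Int) : ∀ (rest : List Int) (s p : Int),
    (if m ≤ (pvScan m s p rest).2 - (pvScan m s p rest).1 + 1
      then some (pvScan m s p rest).1 else none)
    = ((pvMerge s p (pvRunPairs rest)).find? (fun pr => decide (m ≤ pr.2 - pr.1 + 1))).map (fun pr => pr.1) := by
  intro rest
  induction rest with
  | nil =>
    intro s p
    simp only [pvScan, pvRunPairs, pvMerge, List.find?]
    by_cases hc : m ≤ p - s + 1 <;> simp [hc]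
  | cons x rest ih =>
    intro s p
    by_cases hx : x = p + 1
    · subst hx
      rw [show pvScan m s p ((p + 1) :: rest) = pvScan m s (p + 1) rest by simp [pvScan]]
      rw [ih s (p + 1), pvRunPairs_cons, pvMerge_merge]
    · rw [show pvScan m s p (x :: rest) =
          (if m ≤ p - s + 1 then (s, p) else pvScan m x x rest) by simp [pvScan, hx]]
      obtain ⟨b, t, hbt⟩ := pvRunPairs_head x rest
      rw [hbt, show pvMerge s p ((x, b) :: t) = (s, p) :: (x, b) :: t by simp [pvMerge, hx]]
      by_cases hc : m ≤ p - s + 1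
      · simp [hc, List.find?]
      · rw [if_neg hc]
        rw [List.find?_cons_of_neg (by simpa using hc)]
        rw [← hbt, pvRunPairs_cons, ← ih x x]

lemma pvGroupby_head (e : Int × Int) (l : List (Int × Int)) :
    ∃ g gs, pvGroupby (e :: l) = (e :: g) :: gs := by
  cases h : pvGroupby l with
  | nil => exact ⟨[], [], by simp [pvGroupby, h]⟩
  | cons g0 gs =>
    cases g0 with
    | nil => exact ⟨[], [], by simp [pvGroupby, h]⟩
    | cons y g =>
      by_cases hk : (e.1 - e.2 == y.1 - y.2) = true
      · exact ⟨y :: g, gs, by simp [pvGroupby, h, hk]⟩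
      · refine ⟨[], (y :: g) :: gs, ?_⟩
        simp [pvGroupby, h]
        simp at hk
        intro hc; exact absurd hc hk

lemma pvGroups_spec : ∀ (pts : List Int) (s : Int),
    (pvGroupby (PySem.List.enumerate pts s)).map (fun g => g.map (fun q => q.2))
    = (pvRunPairs pts).map (fun pr => PySem.List.pyRange pr.1 (pr.2 + 1) 1) := by
  intro pts
  induction pts with
  | nil => intro s; simp [PySem.List.enumerate, pvGroupby, pvRunPairs]
  | cons x r ih =>
    intro s
    cases r with
    | nil =>
      simp [PySem.List.enumerate_cons, PySem.List.enumerate_nil, pvGroupby, pvRunPairs,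
        PySem.List.pyRange_one_singleton]
    | cons x' r' =>
      obtain ⟨g, gs, hgg⟩ := pvGroupby_head (s + 1, x') (PySem.List.enumerate r' (s + 1 + 1))
      obtain ⟨b, t, hbt⟩ := pvRunPairs_head x' r'
      have hih := ih (s + 1)
      rw [PySem.List.enumerate_cons, hgg, hbt] at hih
      simp only [List.map_cons, List.cons.injEq] at hih
      obtain ⟨hhead, htail⟩ := hih
      have hx'b : x' ≤ b := by
        have := pvRunPairs_le (x' :: r') (x', b) (by rw [hbt]; simp)
        simpa using this
      have henum : PySem.List.enumerate (x :: x' :: r') s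
          = (s, x) :: (s + 1, x') :: PySem.List.enumerate r' (s + 1 + 1) := by
        simp [PySem.List.enumerate_cons]
      have hrp : pvRunPairs (x :: x' :: r')
          = if x' = x + 1 then (x, b) :: t else (x, x) :: (x', b) :: t := by
        rw [pvRunPairs_cons, hbt]; simp [pvMerge]
      have hgb : pvGroupby ((s, x) :: (s + 1, x') :: PySem.List.enumerate r' (s + 1 + 1))
          = if x' = x + 1 then ((s, x) :: (s + 1, x') :: g) :: gs
            else [(s, x)] :: ((s + 1, x') :: g) :: gs := by
        rw [pvGroupby.eq_def]
        simp only
        rw [hgg]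
        have : ((s : Int) - x == s + 1 - x') = decide (x' = x + 1) := by
          by_cases hxx : x' = x + 1 <;> simp [hxx] <;> omega
        simp only [this]
        by_cases hxx : x' = x + 1 <;> simp [hxx]
      rw [henum, hgb, hrp]
      by_cases hxx : x' = x + 1
      · subst hxx
        rw [if_pos rfl, if_pos rfl]
        simp only [List.map_cons]
        rw [htail, PySem.List.pyRange_one_cons (by omega : x < b + 1), ← hhead]
      · simp only [if_neg hxx, List.map_cons, List.map_nil]
        rw [PySem.List.pyRange_one_singleton, hhead, htail]

lemma pvFilterHead {α : Type} (p : α → Bool) : ∀ l : List α, (l.filter p).head? = l.find? p := by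
  intro l
  induction l with
  | nil => rfl
  | cons a l ih => by_cases h : p a <;> simp [List.filter_cons, List.find?_cons, h, ih]

lemma pvDecision (m : Int) (R : List (Int × Int)) (hle : ∀ pr ∈ R, pr.1 ≤ pr.2) :
    (if ((R.map (fun pr => PySem.List.pyRange pr.1 (pr.2 + 1) 1)) ≠ []) then
      match PySem.List.max? (((R.map (fun pr => PySem.List.pyRange pr.1 (pr.2 + 1) 1)).map (fun l => (l.length : Int)))) (fun x => x) with
      | some mx =>
        if m ≤ mx then
          some (PySem.List.pyGetD (((R.map (fun pr => PySem.List.pyRange pr.1 (pr.2 + 1) 1)).filter (fun l => m ≤ (l.length : Int))).map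
            (fun l => PySem.List.pyGetD l 0 0)) 0 0)
        else none
      | none => none
    else none)
    = (R.find? (fun pr => decide (m ≤ pr.2 - pr.1 + 1))).map (fun pr => pr.1) := by
  have hlen : ∀ pr ∈ R, ((PySem.List.pyRange pr.1 (pr.2 + 1) 1).length : Int) = pr.2 - pr.1 + 1 := by
    intro pr h
    rw [PySem.List.length_pyRange_one]
    have := hle pr h
    omega
  cases hRnil : R with
  | nil => simp
  | cons pr0 R' =>
  rw [← hRnil]
  have hRne : R ≠ [] := by rw [hRnil]; simp
  have hlnsne : (R.map (fun pr => PySem.List.pyRange pr.1 (pr.2 + 1) 1)) ≠ [] := by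
    simpa using hRne
  rw [if_pos hlnsne]
  have hfilt : ((R.map (fun pr => PySem.List.pyRange pr.1 (pr.2 + 1) 1)).filter (fun l => m ≤ (l.length : Int))).map
      (fun l => PySem.List.pyGetD l 0 0)
      = (R.filter (fun pr => decide (m ≤ pr.2 - pr.1 + 1))).map (fun pr => pr.1) := by
    rw [List.filter_map]
    rw [List.map_map]
    rw [List.filter_congr (by intro pr h; simp only [Function.comp]; rw [hlen pr h])]
    refine List.map_congr_left ?_
    intro pr h
    have hmem := List.mem_of_mem_filter h
    have h1 := hle pr hmem
    simp only [Function.comp]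
    rw [PySem.List.pyRange_one_cons (by omega : pr.1 < pr.2 + 1)]
    exact PySem.List.pyGetD_zero_cons _ _ _
  by_cases hex : ∃ pr ∈ R, m ≤ pr.2 - pr.1 + 1
  · have hfind : (R.find? (fun pr => decide (m ≤ pr.2 - pr.1 + 1))).isSome := by
      rw [List.find?_isSome]
      obtain ⟨pr, h1, h2⟩ := hex
      exact ⟨pr, h1, by simpa using h2⟩
    obtain ⟨pr₀, hpr₀⟩ := Option.isSome_iff_exists.mp hfind
    cases hmx : PySem.List.max? ((R.map (fun pr => PySem.List.pyRange pr.1 (pr.2 + 1) 1)).map (fun l => (l.length : Int))) (fun x => x) with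
    | none =>
      exfalso
      have := (PySem.List.max?_eq_none_iff _ _).mp hmx
      simp [hRnil] at this
    | some mx =>
      dsimp only
      have hmmx : m ≤ mx := by
        obtain ⟨pr, h1, h2⟩ := hex
        have hv : ((PySem.List.pyRange pr.1 (pr.2 + 1) 1).length : Int)
            ∈ (R.map (fun pr => PySem.List.pyRange pr.1 (pr.2 + 1) 1)).map (fun l => (l.length : Int)) := by
          rw [List.map_map]
          exact List.mem_map_of_mem h1
        have := PySem.List.max?_isMax hmx _ hv
        rw [hlen pr h1] at this
        omega
      rw [if_pos hmmx, hfilt]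
      have hhd : ((R.filter (fun pr => decide (m ≤ pr.2 - pr.1 + 1))).map (fun pr => pr.1)).head? = some pr₀.1 := by
        rw [List.head?_map, pvFilterHead, hpr₀]
        rfl
      cases hF : (R.filter (fun pr => decide (m ≤ pr.2 - pr.1 + 1))).map (fun pr => pr.1) with
      | nil => rw [hF] at hhd; simp at hhd
      | cons a l =>
        rw [hF] at hhd
        simp at hhd
        rw [PySem.List.pyGetD_zero_cons, hhd, hpr₀]
        rfl
  · have hfind : R.find? (fun pr => decide (m ≤ pr.2 - pr.1 + 1)) = none := by
      rw [List.find?_eq_none]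
      intro pr h1
      simp only [decide_eq_true_eq]
      intro h2
      exact hex ⟨pr, h1, h2⟩
    rw [hfind]
    cases hmx : PySem.List.max? ((R.map (fun pr => PySem.List.pyRange pr.1 (pr.2 + 1) 1)).map (fun l => (l.length : Int))) (fun x => x) with
    | none => rfl
    | some mx =>
      dsimp only
      have hmem := PySem.List.max?_mem hmx
      rw [List.map_map] at hmem
      obtain ⟨pr, h1, h2⟩ := List.mem_map.mp hmem
      simp only [Function.comp] at h2
      have : ¬ m ≤ mx := by
        intro hc
        refine hex ⟨pr, h1, ?_⟩
        rw [← hlen pr h1, h2]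
        exact hc
      rw [if_neg this]
      rfl

lemma pvARow_spec (points : List (List Int)) (m y : Int) :
    pvARow points m y = pvAnsAt points m y := by
  have key : ∀ pts : List Int,
      (if ((pvGroupby (PySem.List.enumerate pts 0)).map (fun g => g.map (fun q => q.2))) ≠ [] then
        match PySem.List.max? (((pvGroupby (PySem.List.enumerate pts 0)).map (fun g => g.map (fun q => q.2))).map (fun l => (l.length : Int))) (fun x => x) with
        | some mx =>
          if m ≤ mx then
            some (PySem.List.pyGetD ((((pvGroupby (PySem.List.enumerate pts 0)).map (fun g => g.map (fun q => q.2))).filter (fun l => m ≤ (l.length : Int))).map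
              (fun l => PySem.List.pyGetD l 0 0)) 0 0)
          else none
        | none => none
      else none) = pvRowAns m pts := by
    intro pts
    rw [pvGroups_spec pts 0]
    exact pvDecision m (pvRunPairs pts) (pvRunPairs_le pts)
  unfold pvARow pvAnsAt
  exact key _

lemma pvGoA_found (points : List (List Int)) (m h line : Int) (pos : List Int) :
    pvGoA points m h true line pos = (true, pos) := by
  unfold pvGoA; simp

lemma pvGoA_spec (points : List (List Int)) (m h : Int) : ∀ (n : Nat) (line : Int),
    (h - line).toNat = n →
    pvGoA points m h false line [0, 0] = pvResOf points m (PySem.List.pyRange line h 1) := by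
  intro n
  induction n with
  | zero =>
    intro line hn
    rw [PySem.List.pyRange_one_eq_nil (by omega : h ≤ line)]
    unfold pvGoA
    rw [dif_neg (by simp; omega)]
    simp [pvResOf]
  | succ k ih =>
    intro line hn
    have hlt : line < h := by omega
    rw [PySem.List.pyRange_one_cons hlt]
    unfold pvGoA
    rw [dif_pos ⟨rfl, hlt⟩]
    rw [pvARow_spec]
    unfold pvResOf
    rw [List.findSome?_cons]
    cases hans : pvAnsAt points m line with
    | some x =>
      simp only [Option.map_some]
      rw [pvGoA_found]
    | none =>
      simp only [Option.map_none]
      rw [ih (line + 1) (by omega)]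
      unfold pvResOf
      rfl

lemma pvBuckets_getD (height : Int) : ∀ (points : List (List Int)) (d : PySem.Dict Int (PySem.Set Int)) (y : Int),
    0 ≤ y → y < height →
    (points.foldl (fun d p =>
      let y1 := PySem.List.pyGetD p 1 0
      if 0 ≤ y1 ∧ y1 < height then
        d.modify y1 PySem.Set.empty (fun s => PySem.Set.add s (PySem.List.pyGetD p 0 0))
      else d) d).getD y PySem.Set.empty
    = PySem.Set.update (d.getD y PySem.Set.empty) (pvRowOf points y) := by
  intro points
  induction points with
  | nil => intro d y _ _; simp [pvRowOf, PySem.Set.update_nil]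
  | cons p ps ih =>
    intro d y h0 h1
    rw [List.foldl_cons]
    dsimp only
    have hrow : pvRowOf (p :: ps) y
        = if (PySem.List.pyGetD p 1 0 == y) = true then PySem.List.pyGetD p 0 0 :: pvRowOf ps y else pvRowOf ps y := by
      simp only [pvRowOf, List.filter_cons]
      by_cases hc : (PySem.List.pyGetD p 1 0 == y) = true <;> simp [hc]
    by_cases hy1 : PySem.List.pyGetD p 1 0 = y
    · have hrng : 0 ≤ PySem.List.pyGetD p 1 0 ∧ PySem.List.pyGetD p 1 0 < height := by
        rw [hy1]; exact ⟨h0, h1⟩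
      rw [if_pos hrng, ih _ y h0 h1, hrow, if_pos (by simp [hy1]), hy1]
      rw [PySem.Dict.getD_modify_self, PySem.Set.update_cons]
    · have hne : y ≠ PySem.List.pyGetD p 1 0 := fun hc => hy1 hc.symm
      by_cases hr : 0 ≤ PySem.List.pyGetD p 1 0 ∧ PySem.List.pyGetD p 1 0 < height
      · rw [if_pos hr, ih _ y h0 h1, PySem.Dict.getD_modify_of_ne _ _ _ hne, hrow,
          if_neg (by simp [hy1])]
      · rw [if_neg hr, ih d y h0 h1, hrow, if_neg (by simp [hy1])]

lemma pvBuckets_keys (height : Int) : ∀ (points : List (List Int)) (d : PySem.Dict Int (PySem.Set Int)) (y : Int),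
    (y ∈ (points.foldl (fun d p =>
      let y1 := PySem.List.pyGetD p 1 0
      if 0 ≤ y1 ∧ y1 < height then
        d.modify y1 PySem.Set.empty (fun s => PySem.Set.add s (PySem.List.pyGetD p 0 0))
      else d) d).keys
    ↔ y ∈ d.keys ∨ (0 ≤ y ∧ y < height ∧ ∃ p ∈ points, PySem.List.pyGetD p 1 0 = y)) := by
  intro points
  induction points with
  | nil => intro d y; simp
  | cons p ps ih =>
    intro d y
    rw [List.foldl_cons]
    dsimp only
    by_cases hr : 0 ≤ PySem.List.pyGetD p 1 0 ∧ PySem.List.pyGetD p 1 0 < height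
    · rw [if_pos hr, ih, PySem.Dict.keys_modify, PySem.Dict.mem_keys_insert]
      constructor
      · rintro ((h | h) | ⟨h0, h1, q, hq, hqy⟩)
        · exact Or.inr ⟨by rw [h]; exact hr.1, by rw [h]; exact hr.2, p, List.mem_cons_self, h.symm⟩
        · exact Or.inl h
        · exact Or.inr ⟨h0, h1, q, List.mem_cons_of_mem _ hq, hqy⟩
      · rintro (h | ⟨h0, h1, q, hq, hqy⟩)
        · exact Or.inl (Or.inr h)
        · rcases List.mem_cons.mp hq with h2 | h2
          · exact Or.inl (Or.inl (by rw [← hqy, h2]))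
          · exact Or.inr ⟨h0, h1, q, h2, hqy⟩
    · rw [if_neg hr, ih]
      constructor
      · rintro (h | h)
        · exact Or.inl h
        · obtain ⟨h0, h1, q, hq, hqy⟩ := h
          exact Or.inr ⟨h0, h1, q, List.mem_cons_of_mem _ hq, hqy⟩
      · rintro (h | ⟨h0, h1, q, hq, hqy⟩)
        · exact Or.inl h
        · rcases List.mem_cons.mp hq with h2 | h2
          · exact absurd ⟨by rw [h2] at hqy; rw [hqy]; exact h0, by rw [h2] at hqy; rw [hqy]; exact h1⟩ hr
          · exact Or.inr ⟨h0, h1, q, h2, hqy⟩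

lemma pvBuckets_nodup_aux (height : Int) : ∀ (points : List (List Int)) (d : PySem.Dict Int (PySem.Set Int)),
    d.keys.Nodup →
    (points.foldl (fun d p =>
      let y1 := PySem.List.pyGetD p 1 0
      if 0 ≤ y1 ∧ y1 < height then
        d.modify y1 PySem.Set.empty (fun s => PySem.Set.add s (PySem.List.pyGetD p 0 0))
      else d) d).keys.Nodup := by
  intro points
  induction points with
  | nil => intro d hd; exact hd
  | cons p ps ih =>
    intro d hd
    rw [List.foldl_cons]
    by_cases hr : 0 ≤ PySem.List.pyGetD p 1 0 ∧ PySem.List.pyGetD p 1 0 < height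
    · simp only [if_pos hr]
      exact ih _ (by rw [PySem.Dict.keys_modify]; exact PySem.Dict.nodup_keys_insert _ _ _ hd)
    · simp only [if_neg hr]
      exact ih d hd

lemma pvBuckets_nodup (height : Int) (points : List (List Int)) :
    (pvBuckets points height).keys.Nodup := by
  unfold pvBuckets
  exact pvBuckets_nodup_aux height points PySem.Dict.empty (by simp [PySem.Dict.keys_empty])

lemma pvRowsLoop_spec (points : List (List Int)) (m : Int) (rows : PySem.Dict Int (PySem.Set Int)) :
    ∀ (ys : List Int),
    (∀ y ∈ ys, rows.getD y PySem.Set.empty = PySem.Set.ofList (pvRowOf points y) ∧ pvRowOf points y ≠ []) →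
    pvRowsLoop m rows ys = pvResOf points m ys := by
  intro ys
  induction ys with
  | nil => intro _; simp [pvRowsLoop, pvResOf]
  | cons y ys ih =>
    intro hys
    obtain ⟨hgetD, hne⟩ := hys y List.mem_cons_self
    have hxsne : PySem.List.sorted (rows.getD y PySem.Set.empty) (fun x => x) false ≠ [] := by
      intro hc
      have hperm := PySem.List.sorted_perm (rows.getD y PySem.Set.empty) (fun x => x) false
      rw [hc] at hperm
      have hnil : rows.getD y PySem.Set.empty = [] := List.Perm.eq_nil hperm.symm
      obtain ⟨el, hel⟩ := List.exists_mem_of_ne_nil _ hne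
      have hmem : el ∈ rows.getD y PySem.Set.empty := by
        rw [hgetD]; exact (PySem.Set.mem_ofList _ _).mpr hel
      rw [hnil] at hmem
      simp at hmem
    cases hxs : PySem.List.sorted (rows.getD y PySem.Set.empty) (fun x => x) false with
    | nil => exact absurd hxs hxsne
    | cons x rest =>
      unfold pvRowsLoop
      rw [hxs]
      simp only [PySem.List.pyGetD_zero_cons, PySem.List.slice_from_one, List.tail_cons]
      have hscan := pvScan_spec m rest x x
      rw [← pvRunPairs_cons] at hscan
      have hscan' : (if m ≤ (pvScan m x x rest).2 - (pvScan m x x rest).1 + 1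
          then some (pvScan m x x rest).1 else none) = pvRowAns m (x :: rest) := hscan
      have hans : pvAnsAt points m y = pvRowAns m (x :: rest) := by
        unfold pvAnsAt
        rw [← hgetD, hxs]
      unfold pvResOf
      rw [List.findSome?_cons]
      rw [hans]
      cases hq : pvRowAns m (x :: rest) with
      | some x0 =>
        rw [hq] at hscan'
        by_cases hcond : m ≤ (pvScan m x x rest).2 - (pvScan m x x rest).1 + 1
        · rw [if_pos hcond] at hscan' ⊢
          simp only [Option.some.injEq] at hscan'
          rw [hscan']
          rfl
        · rw [if_neg hcond] at hscan'
          simp at hscan'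
      | none =>
        rw [hq] at hscan'
        by_cases hcond : m ≤ (pvScan m x x rest).2 - (pvScan m x x rest).1 + 1
        · rw [if_pos hcond] at hscan'
          simp at hscan'
        · rw [if_neg hcond]
          simp only [Option.map_none]
          rw [ih (fun z hz => hys z (List.mem_cons_of_mem _ hz))]
          unfold pvResOf
          rfl

lemma pvFindSome?_min {α : Type} (g : Int → Option α) :
    ∀ (l : List Int), l.Pairwise (· < ·) → ∀ y₀ ∈ l, (g y₀).isSome →
    (∀ y ∈ l, y < y₀ → g y = none) → l.findSome? g = g y₀ := by
  intro l
  induction l with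
  | nil => intro _ y₀ h; simp at h
  | cons z l ih =>
    intro hpw y₀ hy₀ hs hmin
    rw [List.findSome?_cons]
    rcases List.mem_cons.mp hy₀ with h | h
    · subst h
      cases hgz : g y₀ with
      | some v => rfl
      | none => rw [hgz] at hs; simp at hs
    · have hzy : z < y₀ := (List.pairwise_cons.mp hpw).1 y₀ h
      rw [hmin z List.mem_cons_self hzy]
      exact ih (List.pairwise_cons.mp hpw).2 y₀ h hs
        (fun y hy hlt => hmin y (List.mem_cons_of_mem _ hy) hlt)

lemma pvFindSome?_min_exists {α : Type} (g : Int → Option α) :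
    ∀ (l : List Int), l.Pairwise (· < ·) → ∀ r, l.findSome? g = some r →
    ∃ y₀ ∈ l, g y₀ = some r ∧ ∀ y ∈ l, y < y₀ → g y = none := by
  intro l
  induction l with
  | nil => intro _ r h; simp at h
  | cons z l ih =>
    intro hpw r h
    rw [List.findSome?_cons] at h
    cases hgz : g z with
    | some v =>
      rw [hgz] at h
      refine ⟨z, List.mem_cons_self, by rw [hgz]; exact h, ?_⟩
      intro y hy hlt
      rcases List.mem_cons.mp hy with h1 | h1
      · exact absurd (h1 ▸ hlt) (lt_irrefl _)
      · exact absurd hlt (not_lt.mpr (le_of_lt ((List.pairwise_cons.mp hpw).1 y h1)))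
    | none =>
      rw [hgz] at h
      obtain ⟨y₀, hy₀, hg, hmin⟩ := ih (List.pairwise_cons.mp hpw).2 r h
      refine ⟨y₀, List.mem_cons_of_mem _ hy₀, hg, ?_⟩
      intro y hy hlt
      rcases List.mem_cons.mp hy with h1 | h1
      · subst h1; exact hgz
      · exact hmin y h1 hlt

lemma pvAnsAt_empty (points : List (List Int)) (m y : Int) (h : pvRowOf points y = []) :
    pvAnsAt points m y = none := by
  simp [pvAnsAt, h, PySem.Set.ofList, PySem.List.sorted, pvRowAns, pvRunPairs]

lemma pvResOf_transfer (points : List (List Int)) (m height : Int) (ks : List Int)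
    (hpw : ks.Pairwise (· < ·))
    (hmem : ∀ y, y ∈ ks ↔ (0 ≤ y ∧ y < height ∧ pvRowOf points y ≠ [])) :
    pvResOf points m (PySem.List.pyRange 0 height 1) = pvResOf points m ks := by
  have hgnone : ∀ y, pvRowOf points y = [] →
      (pvAnsAt points m y).map (fun x => (x, y)) = (none : Option (Int × Int)) := by
    intro y h
    rw [pvAnsAt_empty points m y h]
    rfl
  have hsub : ∀ y ∈ ks, y ∈ PySem.List.pyRange 0 height 1 := by
    intro y hy
    rcases (hmem y).mp hy with ⟨h0, h1, _⟩
    exact PySem.List.mem_pyRange_one.mpr ⟨h0, h1⟩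
  unfold pvResOf
  cases hfs : (PySem.List.pyRange 0 height 1).findSome? (fun y => (pvAnsAt points m y).map (fun x => (x, y))) with
  | none =>
    have hall := List.findSome?_eq_none_iff.mp hfs
    rw [List.findSome?_eq_none_iff.mpr (fun y hy => hall y (hsub y hy))]
  | some r =>
    obtain ⟨y₀, hy₀mem, hg, hmin⟩ := pvFindSome?_min_exists _ _
      (PySem.List.pairwise_lt_pyRange_one 0 height) r hfs
    have hy₀ks : y₀ ∈ ks := by
      apply (hmem y₀).mpr
      have hb := PySem.List.mem_pyRange_one.mp hy₀mem
      refine ⟨hb.1, hb.2, ?_⟩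
      intro hrow
      rw [hgnone y₀ hrow] at hg
      simp at hg
    have hks : ks.findSome? (fun y => (pvAnsAt points m y).map (fun x => (x, y)))
        = (pvAnsAt points m y₀).map (fun x => (x, y₀)) :=
      pvFindSome?_min _ ks hpw y₀ hy₀ks (by rw [hg]; rfl)
        (fun y hy hlt => hmin y (hsub y hy) hlt)
    rw [hks, hg]


-- ===== VERDICT (by name: the statement is the Claim_ definition above) =====
theorem existing_line_spec : Claim_equal_existing_line := by
  intro points m height _ _
  unfold Spec_existing_line existing_line existing_line_alt
  rw [pvGoA_spec points m height ((height - 0).toNat) 0 rfl]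
  show pvResOf points m (PySem.List.pyRange 0 height 1)
      = pvRowsLoop m (pvBuckets points height)
          (PySem.List.sorted (PySem.Dict.keys (pvBuckets points height)) (fun x => x) false)
  have hkeysmem : ∀ y, y ∈ (pvBuckets points height).keys
      ↔ (0 ≤ y ∧ y < height ∧ ∃ p ∈ points, PySem.List.pyGetD p 1 0 = y) := by
    intro y
    unfold pvBuckets
    rw [pvBuckets_keys height points PySem.Dict.empty y]
    simp [PySem.Dict.keys_empty]
  have hrow_ne : ∀ y : Int, (∃ p ∈ points, PySem.List.pyGetD p 1 0 = y) ↔ pvRowOf points y ≠ [] := by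
    intro y
    rw [Ne, pvRowOf, List.map_eq_nil_iff, List.filter_eq_nil_iff]
    simp
  have hksmem : ∀ y, y ∈ PySem.List.sorted (pvBuckets points height).keys (fun x => x) false
      ↔ (0 ≤ y ∧ y < height ∧ pvRowOf points y ≠ []) := by
    intro y
    rw [PySem.List.mem_sorted, hkeysmem y]
    constructor
    · rintro ⟨h0, h1, h2⟩; exact ⟨h0, h1, (hrow_ne y).mp h2⟩
    · rintro ⟨h0, h1, h2⟩; exact ⟨h0, h1, (hrow_ne y).mpr h2⟩
  have hnd : (PySem.List.sorted (pvBuckets points height).keys (fun x => x) false).Nodup :=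
    ((PySem.List.sorted_perm (pvBuckets points height).keys (fun x => x) false).nodup_iff).mpr
      (pvBuckets_nodup height points)
  have hkspw : (PySem.List.sorted (pvBuckets points height).keys (fun x => x) false).Pairwise (· < ·) := by
    have h1 := PySem.List.sorted_pairwise (pvBuckets points height).keys (fun x => x)
    exact (h1.and hnd).imp (fun hab => lt_of_le_of_ne hab.1 hab.2)
  have hloop : ∀ y ∈ PySem.List.sorted (pvBuckets points height).keys (fun x => x) false,
      (pvBuckets points height).getD y PySem.Set.empty = PySem.Set.ofList (pvRowOf points y)
        ∧ pvRowOf points y ≠ [] := by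
    intro y hy
    obtain ⟨h0, h1, h2⟩ := (hksmem y).mp hy
    constructor
    · show (pvBuckets points height).getD y PySem.Set.empty = _
      unfold pvBuckets
      rw [pvBuckets_getD height points PySem.Dict.empty y h0 h1, PySem.Dict.getD_empty,
        PySem.Set.update_empty]
    · exact h2
  rw [pvRowsLoop_spec points m (pvBuckets points height) _ hloop]
  exact pvResOf_transfer points m height _ hkspw hksmem
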